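-- pv_equiv track=rewrite | github.com/comp-think/comp-think.github.io | exercises/understanding/advanced/exercise_43.py | yep
-- ===== SOURCE A (Python) =====
-- def yep(gn):
--     r = 0
--     if len(gn) == 0:
--         return r
--
--     done = False
--
--     for c in gn:
--         if not done:
--             if c in "aeiou":
--                 idx = gn.index(c)
--                 r = (-1 * r) + yep(gn[idx+1:])
--                 done = True
--             else:
--                 r = r + 1
--
--     return r
-- ===== SOURCE B (Python) =====
-- def yep(gn):
--     neg = run = 0
--     for c in gn:
--         if c in "aeiou":
--             neg += run
--             run = 0
--         else:
--             run += 1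
--     return run - neg
-- ===== Notes on version B (the rewrite author's own statement) =====
-- stated objective: faster
-- what changed: Replaces the recursion with repeated slicing/index scans by a single left-to-right pass keeping two counters (consonants since the last vowel, and total consonants before it), returning run - neg.
import Mathlib
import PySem

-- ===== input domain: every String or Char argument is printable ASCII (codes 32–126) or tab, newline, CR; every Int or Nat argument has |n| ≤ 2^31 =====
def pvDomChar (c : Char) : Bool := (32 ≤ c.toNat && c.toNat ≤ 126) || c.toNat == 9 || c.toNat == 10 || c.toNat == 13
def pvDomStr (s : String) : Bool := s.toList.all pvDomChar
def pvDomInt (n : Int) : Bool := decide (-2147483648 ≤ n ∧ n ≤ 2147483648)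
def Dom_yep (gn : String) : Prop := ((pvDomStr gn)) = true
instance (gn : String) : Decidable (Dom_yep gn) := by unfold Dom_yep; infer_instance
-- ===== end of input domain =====

-- B replaces A's recursion with repeated slicing/index scans by one linear pass
-- keeping two consonant counters (objective: faster, O(n^2) -> O(n)).

-- ===== PORT A =====
def pvVowel (c : Char) : Bool := c ∈ ['a', 'e', 'i', 'o', 'u']   -- `c in "aeiou"` (exact on chars)

mutual
-- the `for c in gn` loop of A; carries the whole string gn for `gn.index(c)` and the
-- remaining chars cs, plus the invariant `cs.length ≤ gn.length` (needed for termination)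
def yepLoop (gn : List Char) : (cs : List Char) → Int → Bool → cs.length ≤ gn.length → Int
  | [], r, _, _ => r
  | c :: cs, r, done, h =>
    if done = false then
      if pvVowel c then
        let idx := (PySem.List.index? gn c).getD 0      -- gn.index(c); c always occurs in gn
        yepLoop gn cs ((-1) * r + yepAux (gn.drop (idx + 1))) true
          (by simp at h ⊢; omega)
      else
        yepLoop gn cs (r + 1) false (by simp at h ⊢; omega)
    else
      yepLoop gn cs r done (by simp at h ⊢; omega)
termination_by cs => (gn.length, cs.length)
decreasing_by
  · apply Prod.Lex.left; simp at h ⊢; omega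
  · apply Prod.Lex.right; simp
  · apply Prod.Lex.right; simp
  · apply Prod.Lex.right; simp

def yepAux (gn : List Char) : Int :=
  let r : Int := 0
  if gn.length = 0 then r
  else yepLoop gn gn r false (Nat.le_refl _)
termination_by (gn.length, gn.length + 1)
decreasing_by
  apply Prod.Lex.right; omega
end

def yep (gn : String) : Int := yepAux gn.toList

-- ===== PORT B =====
def bStep (p : Int × Int) (c : Char) : Int × Int :=
  if pvVowel c then (p.1 + p.2, 0) else (p.1, p.2 + 1)

def bAux (l : List Char) : Int :=
  let p := l.foldl bStep (0, 0)
  p.2 - p.1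

def yep_alt (gn : String) : Int := bAux gn.toList

-- ===== PRECONDITION & SPEC =====
def Spec_yep (gn : String) (out : Int) : Prop := out = yep_alt gn
instance (gn : String) (out : Int) : Decidable (Spec_yep gn out) := by unfold Spec_yep; infer_instance

-- ===== CLAIM (what is proved, stated in full; the proofs are below) =====
def Claim_equal_yep : Prop := ∀ (gn : String), Dom_yep gn → Spec_yep gn (yep gn)

-- ===== LEMMAS AND PROOFS =====

-- once `done` is set, the rest of A's loop only copies r
theorem yepLoop_done (gn : List Char) : ∀ (cs : List Char) (r : Int) (h : cs.length ≤ gn.length),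
    yepLoop gn cs r true h = r := by
  intro cs
  induction cs with
  | nil => intro r h; simp [yepLoop]
  | cons c cs ih => intro r h; simp [yepLoop, ih]

-- vowel-free suffix: A's loop just counts the chars
theorem yepLoop_novowel (gn : List Char) : ∀ (cs : List Char) (r : Int)
    (h : cs.length ≤ gn.length), (∀ c ∈ cs, pvVowel c = false) →
    yepLoop gn cs r false h = r + cs.length := by
  intro cs
  induction cs with
  | nil => intro r h _; simp [yepLoop]
  | cons c cs ih =>
    intro r h hv
    have hc : pvVowel c = false := hv c (by simp)
    simp only [yepLoop, hc, Bool.false_eq_true, if_false]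
    rw [ih (r + 1) _ (fun d hd => hv d (by simp [hd]))]
    push_cast [List.length_cons]
    ring

-- A's loop on `pre ++ v :: suf` with vowel-free pre and vowel v
theorem yepLoop_split (gn : List Char) (v : Char) (suf : List Char) (hv : pvVowel v = true) :
    ∀ (pre cs : List Char), cs = pre ++ v :: suf → ∀ (r : Int) (h : cs.length ≤ gn.length),
    (∀ c ∈ pre, pvVowel c = false) →
    yepLoop gn cs r false h =
      (-1) * (r + pre.length) + yepAux (gn.drop (((PySem.List.index? gn v).getD 0) + 1)) := by
  intro pre
  induction pre with
  | nil =>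
    intro cs hcs r h _
    subst hcs
    simp only [List.nil_append, yepLoop, hv]
    rw [yepLoop_done]
    simp
  | cons c pre ih =>
    intro cs hcs r h hp
    subst hcs
    have hc : pvVowel c = false := hp c (by simp)
    simp only [List.cons_append, yepLoop, hc, Bool.false_eq_true, if_false]
    rw [ih (pre ++ v :: suf) rfl (r + 1) _ (fun d hd => hp d (by simp [hd]))]
    push_cast [List.length_cons]
    ring

-- shifting the first accumulator of B's fold
theorem bStep_shift : ∀ (l : List Char) (n r : Int),
    l.foldl bStep (n, r) = ((l.foldl bStep (0, r)).1 + n, (l.foldl bStep (0, r)).2) := by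
  intro l
  induction l with
  | nil => intro n r; simp
  | cons c cs ih =>
    intro n r
    cases hc : pvVowel c
    · simp only [List.foldl_cons, bStep, hc, Bool.false_eq_true, if_false]
      rw [ih n (r + 1)]
    · simp only [List.foldl_cons, bStep, hc, if_true, zero_add]
      rw [ih (n + r) 0, ih r 0]
      simp only [Prod.mk.injEq, and_true]
      ring

-- vowel-free prefix for B's fold
theorem bStep_novowel : ∀ (l : List Char) (n r : Int), (∀ c ∈ l, pvVowel c = false) →
    l.foldl bStep (n, r) = (n, r + l.length) := by
  intro l
  induction l with
  | nil => intro n r _; simp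
  | cons c cs ih =>
    intro n r hv
    have hc : pvVowel c = false := hv c (by simp)
    simp only [List.foldl_cons, bStep, hc, Bool.false_eq_true, if_false]
    rw [ih n (r + 1) (fun d hd => hv d (by simp [hd]))]
    push_cast [List.length_cons]
    simp only [Prod.mk.injEq, true_and]
    ring

theorem main_list : ∀ (n : Nat) (gn : List Char), gn.length ≤ n → yepAux gn = bAux gn := by
  intro n
  induction n with
  | zero =>
    intro gn h
    have : gn = [] := List.length_eq_zero_iff.mp (Nat.le_zero.mp h)
    subst this
    simp [yepAux, bAux]
  | succ n ih =>
    intro gn h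
    rcases hrest : gn.dropWhile (fun c => !pvVowel c) with _ | ⟨v, suf⟩
    · -- no vowel in gn at all
      have hgn : gn = gn.takeWhile (fun c => !pvVowel c) := by
        conv_lhs => rw [← List.takeWhile_append_dropWhile (p := fun c => !pvVowel c) (l := gn)]
        rw [hrest, List.append_nil]
      have hall : ∀ c ∈ gn, pvVowel c = false := by
        intro c hc
        rw [hgn] at hc
        simpa using List.mem_takeWhile_imp hc
      rcases hg : gn with _ | ⟨c, cs⟩
      · simp [yepAux, bAux]
      · subst hg
        simp only [yepAux, List.length_cons]
        rw [if_neg (by omega)]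
        rw [yepLoop_novowel _ _ _ _ hall]
        rw [bAux, bStep_novowel _ _ _ hall]
        simp
    · -- first vowel v, gn = pre ++ v :: suf
      set pre := gn.takeWhile (fun c => !pvVowel c) with hpre
      have hsplit : gn = pre ++ v :: suf := by
        rw [hpre, ← hrest, List.takeWhile_append_dropWhile]
      have hprev : ∀ c ∈ pre, pvVowel c = false := by
        intro c hc
        simpa using List.mem_takeWhile_imp hc
      have hvv : pvVowel v = true := by
        have := List.head?_dropWhile_not (p := fun c => !pvVowel c) (l := gn)
        rw [hrest] at this
        simpa using this
      have hvnp : v ∉ pre := fun hm => by simp [hprev v hm] at hvv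
      have hidx : PySem.List.index? gn v = some pre.length := by
        rw [hsplit]
        exact Iff.mpr (PySem.List.index?_eq_some_iff _ _ _) ⟨pre, suf, rfl, rfl, hvnp⟩
      have hdrop : gn.drop (pre.length + 1) = suf := by
        rw [hsplit, List.drop_append, List.drop_eq_nil_of_le (by omega), List.nil_append]
        simp
      have hlen : gn.length = pre.length + 1 + suf.length := by
        rw [hsplit]; simp; omega
      -- A side: yepAux gn = -|pre| + yepAux suf
      have hstep := yepLoop_split gn v suf hvv pre gn hsplit 0 (Nat.le_refl _) hprev
      rw [hidx] at hstep
      simp only [Option.getD_some] at hstep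
      rw [hdrop] at hstep
      have hA : yepAux gn = (-1) * (pre.length : Int) + yepAux suf := by
        rw [yepAux]
        rw [if_neg (by omega)]
        rw [hstep]
        ring
      -- B side: bAux gn = bAux suf - |pre|
      have hB : bAux gn = bAux suf - (pre.length : Int) := by
        rw [bAux, hsplit, List.foldl_append]
        rw [bStep_novowel _ _ _ hprev]
        simp only [List.foldl_cons, bStep, hvv, if_true, zero_add]
        rw [bStep_shift]
        rw [bAux]
        ring_nf
      rw [hA, hB, ih suf (by omega)]
      ring

-- ===== VERDICT (by name: the statement is the Claim_ definition above) =====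
theorem yep_spec : Claim_equal_yep := by
  intro gn _
  unfold Spec_yep yep yep_alt
  exact main_list gn.toList.length gn.toList (Nat.le_refl _)
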